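-- pv_equiv track=rewrite | github.com/mariakasmani12/codility_solutions | threelettersblocks.py | solution
-- ===== SOURCE A (Python) =====
-- def solution(S):
--
--
--     N = len(S)
--     max_len = 0
--
--
--     alphabet = set(S)
--     letters = list(alphabet)
--
--     for i in range(len(letters)):
--         for j in range(len(letters)):
--             for k in range(len(letters)):
--                 used = [letters[i]]
--                 if letters[j] != letters[i]:
--                     used.append(letters[j])
--                 if letters[k] != letters[j] and letters[k] != letters[i]:
--                     used.append(letters[k])
--
--                 curr_len = 0
--                 blocks = []
--                 prev = ''
--                 for ch in S:
--                     if ch not in used: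
--                         continue
--                     if ch != prev:
--                         if len(blocks) == 3:
--                             break
--                         blocks.append(ch)
--                     curr_len += 1
--                     prev = ch
--
--                 max_len = max(max_len, curr_len)
--
--     return max_len
-- ===== SOURCE B (Python) =====
-- def solution(S):
--     # Run-length-encode S once, then scan runs (not characters) per letter subset.
--     letters = list(set(S))
--     runs = []
--     c = None
--     n = 0
--     for ch in S:
--         if ch == c:
--             n += 1
--         else:
--             if n:
--                 runs.append((c, n))
--             c, n = ch, 1
--     if n:
--         runs.append((c, n))
--
--     max_len = 0
--     for i in range(len(letters)):
--         for j in range(len(letters)):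
--             for k in range(len(letters)):
--                 used = {letters[i], letters[j], letters[k]}
--                 total = 0
--                 blocks = 0
--                 prev = None
--                 for ch, L in runs:
--                     if ch not in used:
--                         continue
--                     if ch != prev:
--                         if blocks == 3:
--                             break
--                         blocks += 1
--                     total += L
--                     prev = ch
--                 max_len = max(max_len, total)
--     return max_len
-- ===== Notes on version B (the rewrite author's own statement) =====
-- stated objective: faster
-- what changed: B run-length-encodes S once and each letter-subset scan walks the r runs (adding whole run lengths, counting blocks with an integer, merging same-letter runs split by removed letters) instead of A's per-character scan, dropping the per-subset cost from O(n) to O(r).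
import Mathlib
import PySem

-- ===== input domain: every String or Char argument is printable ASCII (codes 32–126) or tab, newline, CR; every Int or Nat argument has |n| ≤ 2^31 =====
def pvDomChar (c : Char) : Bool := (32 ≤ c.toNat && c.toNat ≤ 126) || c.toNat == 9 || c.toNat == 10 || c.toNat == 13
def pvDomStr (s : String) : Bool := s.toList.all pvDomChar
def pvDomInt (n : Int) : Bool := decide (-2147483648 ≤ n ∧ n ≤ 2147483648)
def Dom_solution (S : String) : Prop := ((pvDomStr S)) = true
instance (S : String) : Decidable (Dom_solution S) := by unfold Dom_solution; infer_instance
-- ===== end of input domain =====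

-- B run-length-encodes S once and scans runs instead of characters per letter subset
-- (measurably faster on the timed inputs; result proved identical on all inputs).

-- ===== PORT A =====
-- A's inner character loop: state (curr_len, blocks : List Char, prev).
-- Python's initial prev = '' is modeled as `none` (a one-char string never equals '').
def solLoopA (used : List Char) : List Char → Int → List Char → Option Char → Int
  | [], curr, _, _ => curr
  | ch :: rest, curr, blocks, prev =>
    if ch ∈ used then
      if some ch ≠ prev then
        if blocks.length = 3 then curr
        else solLoopA used rest (curr + 1) (blocks ++ [ch]) (some ch)
      else solLoopA used rest (curr + 1) blocks prev
    else solLoopA used rest curr blocks prev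

-- A's `used` list: [letters[i]] + conditional appends.
def usedA (li lj lk : Char) : List Char :=
  [li] ++ (if lj ≠ li then [lj] else []) ++ (if lk ≠ lj ∧ lk ≠ li then [lk] else [])

def solution (S : String) : Int :=
  let letters : List Char := PySem.Set.ofList S.toList
  (PySem.List.pyRange 0 (letters.length : Int) 1).foldl (fun acc i =>
    (PySem.List.pyRange 0 (letters.length : Int) 1).foldl (fun acc j =>
      (PySem.List.pyRange 0 (letters.length : Int) 1).foldl (fun acc k =>
        max acc (solLoopA
          (usedA (PySem.List.pyGetD letters i ' ') (PySem.List.pyGetD letters j ' ')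
                 (PySem.List.pyGetD letters k ' '))
          S.toList 0 [] none)) acc) acc) 0

-- ===== PORT B =====
-- B's RLE loop: state (runs, c : Option Char, n); Python's c = None is `none`.
-- `c.getD ch` only unwraps: it is taken exactly when n ≠ 0, where c = some _.
def rleStepB (st : List (Char × Int) × Option Char × Int) (ch : Char) :
    List (Char × Int) × Option Char × Int :=
  if some ch = st.2.1 then (st.1, st.2.1, st.2.2 + 1)
  else ((if st.2.2 ≠ 0 then st.1 ++ [(st.2.1.getD ch, st.2.2)] else st.1), some ch, 1)

def rleB (l : List Char) : List (Char × Int) :=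
  let st := l.foldl rleStepB ([], none, 0)
  if st.2.2 ≠ 0 then st.1 ++ [(st.2.1.getD ' ', st.2.2)] else st.1

-- B's inner run loop: state (total, blocks : Int, prev).
def solLoopB (used : PySem.Set Char) : List (Char × Int) → Int → Int → Option Char → Int
  | [], total, _, _ => total
  | (ch, L) :: rest, total, blocks, prev =>
    if ch ∈ used then
      if some ch ≠ prev then
        if blocks = 3 then total
        else solLoopB used rest (total + L) (blocks + 1) (some ch)
      else solLoopB used rest (total + L) blocks (some ch)
    else solLoopB used rest total blocks prev

def solution_alt (S : String) : Int :=
  let letters : List Char := PySem.Set.ofList S.toList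
  let runs := rleB S.toList
  (PySem.List.pyRange 0 (letters.length : Int) 1).foldl (fun acc i =>
    (PySem.List.pyRange 0 (letters.length : Int) 1).foldl (fun acc j =>
      (PySem.List.pyRange 0 (letters.length : Int) 1).foldl (fun acc k =>
        max acc (solLoopB
          (PySem.Set.ofList [PySem.List.pyGetD letters i ' ', PySem.List.pyGetD letters j ' ',
                             PySem.List.pyGetD letters k ' '])
          runs 0 0 none)) acc) acc) 0

-- ===== PRECONDITION & SPEC =====
def Spec_solution (S : String) (out : Int) : Prop := out = solution_alt S
instance (S : String) (out : Int) : Decidable (Spec_solution S out) := by unfold Spec_solution; infer_instance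

-- ===== CLAIM (what is proved, stated in full; the proofs are below) =====
def Claim_equal_solution : Prop := ∀ (S : String), Dom_solution S → Spec_solution S (solution S)

-- ===== LEMMAS AND PROOFS =====

-- Structural (left-recursive) run-length encoding used only by the proof.
def rleAux (c : Char) (n : Int) : List Char → List (Char × Int)
  | [] => [(c, n)]
  | d :: rest => if d = c then rleAux c (n + 1) rest else (c, n) :: rleAux d 1 rest

lemma rleB_foldl (l : List Char) : ∀ (runs : List (Char × Int)) (c : Char) (n : Int), 1 ≤ n →
    (if (l.foldl rleStepB (runs, some c, n)).2.2 ≠ 0 then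
        (l.foldl rleStepB (runs, some c, n)).1
          ++ [((l.foldl rleStepB (runs, some c, n)).2.1.getD ' ', (l.foldl rleStepB (runs, some c, n)).2.2)]
      else (l.foldl rleStepB (runs, some c, n)).1) = runs ++ rleAux c n l := by
  induction l with
  | nil =>
    intro runs c n hn
    simp only [List.foldl_nil, rleAux]
    rw [if_pos (show n ≠ 0 by omega)]
    rfl
  | cons d rest ih =>
    intro runs c n hn
    by_cases hdc : d = c
    · subst hdc
      simp only [List.foldl_cons, rleStepB]
      rw [show rleAux d n (d :: rest) = rleAux d (n + 1) rest by simp [rleAux]]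
      exact ih runs d (n + 1) (by omega)
    · have h1 : ¬ (some d = some c) := by simp [hdc]
      simp only [List.foldl_cons, rleStepB, if_neg h1, if_pos (show n ≠ 0 by omega), Option.getD_some]
      rw [show rleAux c n (d :: rest) = (c, n) :: rleAux d 1 rest by simp [rleAux, hdc]]
      rw [ih (runs ++ [(c, n)]) d 1 (by omega)]
      simp

lemma rleB_eq (l : List Char) :
    rleB l = match l with | [] => [] | c :: rest => rleAux c 1 rest := by
  cases l with
  | nil => simp [rleB]
  | cons c rest =>
    show rleB (c :: rest) = rleAux c 1 rest
    unfold rleB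
    have h1 : ¬ (some c = (none : Option Char)) := by simp
    simp only [List.foldl_cons, rleStepB, if_neg h1, if_neg (show ¬((0:Int) ≠ 0) by simp)]
    exact rleB_foldl rest [] c 1 (by omega)

-- one A-step on the head char, phrased as "process a pending run of length n".
def pendA (u : List Char) (c : Char) (n : Int) (l : List Char) (total : Int)
    (blocks : List Char) (prev : Option Char) : Int :=
  if c ∈ u then
    if some c ≠ prev then
      if blocks.length = 3 then total
      else solLoopA u l (total + n) (blocks ++ [c]) (some c)
    else solLoopA u l (total + n) blocks prev
  else solLoopA u l total blocks prev

lemma solLoopA_cons (u : List Char) (d : Char) (rest : List Char) (T : Int)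
    (bl : List Char) (P : Option Char) :
    solLoopA u (d :: rest) T bl P = pendA u d 1 rest T bl P := by
  simp [solLoopA, pendA]

lemma scan_main (u : List Char) (l : List Char) : ∀ (c : Char) (n total : Int)
    (blocks : List Char) (prev : Option Char), 1 ≤ n →
    solLoopB u (rleAux c n l) total (blocks.length : Int) prev = pendA u c n l total blocks prev := by
  induction l with
  | nil =>
    intro c n total bl prev _
    simp only [rleAux, pendA, solLoopB, solLoopA]
    have h3 : ((bl.length : Int) = 3) ↔ bl.length = 3 := by omega
    by_cases hu : c ∈ u
    · by_cases hp : some c ≠ prev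
      · by_cases hl : bl.length = 3
        · simp [hu, hp, hl]
        · simp [hu, hp, hl, h3]
      · simp [hu, hp]
    · simp [hu]
  | cons d rest ih =>
    intro c n total bl prev hn
    by_cases hdc : d = c
    · subst hdc
      rw [show rleAux d n (d :: rest) = rleAux d (n + 1) rest by simp [rleAux]]
      rw [ih d (n + 1) total bl prev (by omega)]
      simp only [pendA, solLoopA]
      by_cases hu : d ∈ u
      · by_cases hp : some d ≠ prev
        · by_cases hl : bl.length = 3
          · simp [hu, hp, hl]
          · simp [hu, hp, hl, add_assoc]
        · simp [hu, hp, add_assoc]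
      · simp [hu]
    · rw [show rleAux c n (d :: rest) = (c, n) :: rleAux d 1 rest by simp [rleAux, hdc]]
      simp only [solLoopB, pendA]
      have h3 : ((bl.length : Int) = 3) ↔ bl.length = 3 := by omega
      by_cases hu : c ∈ u
      · by_cases hp : some c ≠ prev
        · by_cases hl : bl.length = 3
          · simp [hu, hp, hl]
          · simp only [if_pos hu, if_pos hp, if_neg hl, if_neg (h3.not.mpr hl)]
            have : (bl.length : Int) + 1 = (((bl ++ [c]).length : Nat) : Int) := by
              simp only [List.length_append, List.length_cons, List.length_nil]; push_cast; ring
            rw [this, ih d 1 (total + n) (bl ++ [c]) (some c) le_rfl, solLoopA_cons]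
        · simp only [if_pos hu, if_neg hp]
          have hp' : some c = prev := by tauto
          subst hp'
          rw [ih d 1 (total + n) bl (some c) le_rfl, solLoopA_cons]
      · simp only [if_neg hu]
        rw [ih d 1 total bl prev le_rfl, solLoopA_cons]

-- solLoopB only looks at membership in `used`.
lemma solLoopB_congr (u₁ u₂ : PySem.Set Char) (h : ∀ ch, ch ∈ u₁ ↔ ch ∈ u₂) :
    ∀ (rs : List (Char × Int)) (T B : Int) (P : Option Char),
    solLoopB u₁ rs T B P = solLoopB u₂ rs T B P := by
  intro rs
  induction rs with
  | nil => intro T B P; rfl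
  | cons r rest ih =>
    intro T B P
    obtain ⟨ch, L⟩ := r
    simp only [solLoopB]
    by_cases hu : ch ∈ u₁
    · rw [if_pos hu, if_pos ((h ch).mp hu)]
      by_cases hp : some ch ≠ P
      · by_cases hB : B = 3
        · simp [hp, hB]
        · simp [hp, hB, ih]
      · simp [hp, ih]
    · rw [if_neg hu, if_neg (fun hx => hu ((h ch).mpr hx))]
      exact ih T B P

lemma mem_usedA (li lj lk ch : Char) : ch ∈ usedA li lj lk ↔ ch ∈ [li, lj, lk] := by
  unfold usedA
  by_cases h1 : lj = li <;> by_cases h2 : lk = lj <;> by_cases h3 : lk = li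
  all_goals (simp_all; try tauto)

-- per-triple equality of the two inner scans
lemma inner_eq (li lj lk : Char) (l : List Char) :
    solLoopA (usedA li lj lk) l 0 [] none
      = solLoopB (PySem.Set.ofList [li, lj, lk]) (rleB l) 0 0 none := by
  rw [solLoopB_congr (PySem.Set.ofList [li, lj, lk]) (usedA li lj lk)
      (fun ch => by rw [PySem.Set.mem_ofList, mem_usedA])]
  rw [rleB_eq]
  cases l with
  | nil => rfl
  | cons c rest =>
    rw [solLoopA_cons]
    have := scan_main (usedA li lj lk) rest c 1 0 [] none le_rfl
    simpa using this.symm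

-- ===== VERDICT (by name: the statement is the Claim_ definition above) =====
theorem solution_spec : Claim_equal_solution := by
  intro S _
  show solution S = solution_alt S
  unfold solution solution_alt
  simp only [inner_eq]
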